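-- pv_equiv track=rewrite | github.com/funchaal/LPR-AI | app/modules/Tracking.py | definePossibleReadings
-- ===== SOURCE A (Python) =====
-- from collections import defaultdict
--
-- def definePossibleReadings(plates: dict) -> list:
--     """
--     Algoritmo para pontuar e classificar as leituras de placas com base em
--     substrings comuns, retornando as mais prováveis.
--     """
--     plate_pontuation = defaultdict(int)
--
--     for plate in plates.keys():
--         # Gera substrings de tamanho 2 até o tamanho da própria placa
--         substrings = {
--             plate[j:j + i]
--             for i in range(2, len(plate) + 1)
--             for j in range(len(plate) - i + 1)
--         }
--         # Compara com todas as outras leituras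
--         for substring in substrings:
--             for reading, count in plates.items():
--                 if substring in reading:
--                     plate_pontuation[plate] += plates[plate]
--
--     # Retorna as 2 placas com maior pontuação
--     top_plates = sorted(plate_pontuation, key=plate_pontuation.get, reverse=True)[:2]
--     return top_plates
-- ===== SOURCE B (Python) =====
-- def definePossibleReadings(plates: dict) -> list:
--     """
--     Inverted-index rewrite: count, for every distinct substring (length >= 2)
--     of every reading, how many readings contain it; then score each plate in
--     one pass instead of rescanning all readings per substring.
--     """
--     def substrings(s):
--         return {
--             s[j:j + i]
--             for i in range(2, len(s) + 1)
--             for j in range(len(s) - i + 1)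
--         }
--
--     sub_count = {}
--     for reading in plates.keys():
--         for s in substrings(reading):
--             sub_count[s] = sub_count.get(s, 0) + 1
--
--     scores = {}
--     for plate in plates.keys():
--         if len(plate) >= 2:
--             scores[plate] = plates[plate] * sum(
--                 sub_count.get(s, 0) for s in substrings(plate)
--             )
--
--     return sorted(scores, key=scores.get, reverse=True)[:2]
-- ===== Notes on version B (the rewrite author's own statement) =====
-- stated objective: faster
-- what changed: Builds a substring->reading-count inverted index in one pass over the readings, then scores each plate by summing index counts over its distinct substrings, instead of rescanning every reading for every substring of every plate.
import Mathlib
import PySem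

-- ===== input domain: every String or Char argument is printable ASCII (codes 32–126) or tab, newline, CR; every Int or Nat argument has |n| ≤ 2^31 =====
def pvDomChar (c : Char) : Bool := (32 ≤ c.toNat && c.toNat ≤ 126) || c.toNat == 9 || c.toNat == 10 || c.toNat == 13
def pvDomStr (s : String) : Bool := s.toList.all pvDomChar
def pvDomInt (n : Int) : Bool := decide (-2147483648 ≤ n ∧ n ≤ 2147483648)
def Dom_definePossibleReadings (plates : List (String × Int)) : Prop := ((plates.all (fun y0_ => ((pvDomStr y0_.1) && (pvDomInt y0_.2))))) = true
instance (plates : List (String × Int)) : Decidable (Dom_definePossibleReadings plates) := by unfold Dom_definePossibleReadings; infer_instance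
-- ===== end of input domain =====

-- B replaces A's rescan of every reading for every substring of every plate by a
-- substring->reading-count table built once, then scores each plate in one pass (faster).

-- ===== PORT A =====
-- the set comprehension { plate[j:j+i] for i in range(2, len(plate)+1) for j in range(len(plate)-i+1) }
-- (the enumerated list; both Pythons wrap it in a set, the ports wrap it in PySem.Set.ofList)
def pySubstrings (p : String) : List String :=
  (PySem.List.pyRange 2 (PySem.Str.len p + 1) 1).flatMap (fun i =>
    (PySem.List.pyRange 0 (PySem.Str.len p - i + 1) 1).map (fun j =>
      PySem.Str.slice p (some j) (some (j + i))))

-- plates[k]: dict lookup on the association list (first match; total here because it is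
-- only applied to keys of the dict)
def dictGet (plates : List (String × Int)) (k : String) : Int :=
  ((plates.find? (fun pr => pr.1 == k)).map (·.2)).getD 0

def definePossibleReadings (plates : List (String × Int)) : List String :=
  let pont : PySem.Dict String Int :=
    plates.foldl (fun d pr =>
      let plate := pr.1
      let substrings : PySem.Set String := PySem.Set.ofList (pySubstrings plate)
      substrings.foldl (fun d s =>
        plates.foldl (fun d rc =>
          if PySem.Str.isIn s rc.1 then d.modify plate 0 (· + dictGet plates plate) else d)
          d) d)
      PySem.Dict.empty
  PySem.List.slice (PySem.List.sorted pont.keys (fun k => pont.getD k 0) true) none (some 2)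

-- ===== PORT B =====
def definePossibleReadings_alt (plates : List (String × Int)) : List String :=
  let subCount : PySem.Dict String Int :=
    plates.foldl (fun d pr =>
      (PySem.Set.ofList (pySubstrings pr.1)).foldl (fun d s => d.insert s (d.getD s 0 + 1)) d)
      PySem.Dict.empty
  let scores : PySem.Dict String Int :=
    plates.foldl (fun d pr =>
      if 2 ≤ PySem.Str.len pr.1 then
        d.insert pr.1 (dictGet plates pr.1 *
          ((PySem.Set.ofList (pySubstrings pr.1)).map (fun s => subCount.getD s 0)).sum)
      else d)
      PySem.Dict.empty
  PySem.List.slice (PySem.List.sorted scores.keys (fun k => scores.getD k 0) true) none (some 2)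

-- ===== PRECONDITION & SPEC =====
-- Pre_ models the dict argument: an association list stands for a Python dict, whose keys
-- are unique; nothing else is excluded.
def Pre_definePossibleReadings (plates : List (String × Int)) : Prop :=
  (plates.map (·.1)).Nodup
instance (plates : List (String × Int)) : Decidable (Pre_definePossibleReadings plates) := by
  unfold Pre_definePossibleReadings; infer_instance

def pvWitness_definePossibleReadings : (List (String × Int)) :=
  [("ABC1", 3), ("BC12", 2), ("X", 1)]

def Spec_definePossibleReadings (plates : List (String × Int)) (out : List String) : Prop := out = definePossibleReadings_alt plates
instance (plates : List (String × Int)) (out : List String) : Decidable (Spec_definePossibleReadings plates out) := by unfold Spec_definePossibleReadings; infer_instance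

-- ===== CLAIM (what is proved, stated in full; the proofs are below) =====
def Claim_equal_definePossibleReadings : Prop := ∀ (plates : List (String × Int)), Dom_definePossibleReadings plates → Pre_definePossibleReadings plates → Spec_definePossibleReadings plates (definePossibleReadings plates)

-- ===== LEMMAS AND PROOFS =====

-- how many entries of `plates` have a reading containing s (what A's innermost loop counts)
def hitCount (plates : List (String × Int)) (s : String) : Nat :=
  plates.countP (fun rc => PySem.Str.isIn s rc.1)

-- the total number of bumps A performs for one plate
def totalHits (plates : List (String × Int)) (p : String) : Nat :=
  ((PySem.Set.ofList (pySubstrings p)).map (hitCount plates)).sum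

-- membership in the substring comprehension = infix of length ≥ 2
theorem mem_pySubstrings (s p : String) :
    s ∈ pySubstrings p ↔ 2 ≤ s.toList.length ∧ s.toList <:+: p.toList := by
  simp only [pySubstrings, List.mem_flatMap, List.mem_map, PySem.List.mem_pyRange_one]
  constructor
  · rintro ⟨i, ⟨h2i, hin⟩, j, ⟨h0j, hjn⟩, heq⟩
    have heq' : (PySem.Str.slice p (some j) (some (j + i))).toList = s.toList := by
      rw [heq]
    rw [PySem.Str.toList_slice, PySem.Chars.slice_eq_listSlice,
        PySem.List.slice_toNat _ h0j (by omega)] at heq'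
    have htn : (j + i).toNat - j.toNat = i.toNat := by omega
    rw [htn] at heq'
    have hlen : p.toList.length = (PySem.Str.len p).toNat := by
      simp [PySem.Str.len_eq]
    constructor
    · rw [← heq']
      rw [List.length_take, List.length_drop]
      omega
    · rw [← heq']
      exact ((List.take_prefix _ _).isInfix).trans (p.toList.drop_suffix _).isInfix
  · rintro ⟨hl, hinf⟩
    obtain ⟨u, w, hw⟩ := hinf
    have hpre : s.toList <+: p.toList.drop u.length := by
      rw [← hw]; simp
    have hlenle : s.toList.length + u.length ≤ p.toList.length := by
      have := hpre.length_le
      rw [List.length_drop] at this; omega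
    refine ⟨(s.toList.length : Int), ⟨by exact_mod_cast hl, ?_⟩,
      (u.length : Int), ⟨by positivity, ?_⟩, ?_⟩
    · have : (PySem.Str.len p) = (p.toList.length : Int) := by simp [PySem.Str.len_eq]
      rw [this]; omega
    · have : (PySem.Str.len p) = (p.toList.length : Int) := by simp [PySem.Str.len_eq]
      rw [this]; omega
    · apply String.ext_iff.mpr
      rw [PySem.Str.toList_slice, PySem.Chars.slice_eq_listSlice,
          PySem.List.slice_toNat _ (by positivity) (by positivity)]
      have h1 : ((u.length:Int) + (s.toList.length:Int)).toNat - ((u.length:Int)).toNat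
          = s.toList.length := by omega
      rw [h1]
      have := List.prefix_iff_eq_take.mp hpre
      simp only [Int.toNat_natCast]
      exact this.symm

-- a plate shorter than 2 characters has no substrings at all
theorem pySubstrings_short (p : String) (h : p.toList.length < 2) : pySubstrings p = [] := by
  have h0 : PySem.List.pyRange 2 (PySem.Str.len p + 1) 1 = [] := by
    apply PySem.List.pyRange_one_eq_nil
    rw [PySem.Str.len_eq]; omega
  rw [pySubstrings, h0]
  rfl

theorem totalHits_short (plates : List (String × Int)) (p : String)
    (h : p.toList.length < 2) : totalHits plates p = 0 := by
  simp [totalHits, pySubstrings_short p h, PySem.Set.ofList_nil]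

theorem totalHits_pos (plates : List (String × Int)) (p : String)
    (h2 : 2 ≤ p.toList.length) (hmem : p ∈ plates.map (·.1)) :
    1 ≤ totalHits plates p := by
  have hself : p ∈ PySem.Set.ofList (pySubstrings p) := by
    rw [PySem.Set.mem_ofList, mem_pySubstrings]
    exact ⟨h2, List.infix_refl _⟩
  have hhit : 1 ≤ hitCount plates p := by
    obtain ⟨pr, hpr, hfst⟩ := List.mem_map.mp hmem
    have : PySem.Str.isIn p pr.1 = true := by
      rw [PySem.Str.isIn_iff_infix, hfst]
    exact List.countP_pos_iff.mpr ⟨pr, hpr, by simpa using this⟩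
  calc 1 ≤ hitCount plates p := hhit
    _ ≤ totalHits plates p :=
      List.le_sum_of_mem (List.mem_map.mpr ⟨p, hself, rfl⟩)

-- (d.insert k v).keys = add
theorem keys_insert_add (d : PySem.Dict String Int) (k : String) (v : Int) :
    (d.insert k v).keys = PySem.Set.add d.keys k := by
  rw [PySem.Set.add_eq_ite]
  by_cases h : k ∈ d.keys
  · rw [PySem.Dict.keys_insert_of_contains, if_pos h]
    exact (PySem.Dict.contains_iff_mem_keys d k).mpr h
  · rw [PySem.Dict.keys_insert_of_not_contains, if_neg h]
    cases hc : d.contains k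
    · rfl
    · exact absurd ((PySem.Dict.contains_iff_mem_keys d k).mp hc) h

-- A's innermost loop: one bump per hit
theorem foldl_if_modify (l : List (String × Int)) (s k : String) (v : Int)
    (d : PySem.Dict String Int) :
    l.foldl (fun d rc =>
        if PySem.Str.isIn s rc.1 then d.modify k 0 (· + v) else d) d
      = (fun d : PySem.Dict String Int => d.modify k 0 (· + v))^[l.countP
          (fun rc => PySem.Str.isIn s rc.1)] d := by
  induction l generalizing d with
  | nil => rfl
  | cons rc l ih =>
    rw [List.foldl_cons, List.countP_cons]
    cases hc : PySem.Str.isIn s rc.1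
    · simp only [hc, if_false, Bool.false_eq_true, Nat.add_zero] at *
      exact ih d
    · simp only [if_true, Nat.add_one]
      rw [Function.iterate_succ_apply]
      exact ih _

theorem iterate_bump_getD_self (k : String) (v : Int) (n : Nat) (d : PySem.Dict String Int) :
    ((fun d : PySem.Dict String Int => d.modify k 0 (· + v))^[n] d).getD k 0
      = d.getD k 0 + n * v := by
  induction n generalizing d with
  | zero => simp
  | succ n ih =>
    rw [Function.iterate_succ_apply', PySem.Dict.getD_modify_self, ih]
    push_cast; ring
    
theorem iterate_bump_getD_ne (k k' : String) (v : Int) (n : Nat) (d : PySem.Dict String Int)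
    (h : k' ≠ k) :
    ((fun d : PySem.Dict String Int => d.modify k 0 (· + v))^[n] d).getD k' 0
      = d.getD k' 0 := by
  induction n generalizing d with
  | zero => simp
  | succ n ih =>
    rw [Function.iterate_succ_apply', PySem.Dict.getD_modify_of_ne _ _ _ h, ih]

theorem iterate_bump_keys (k : String) (v : Int) (n : Nat) (d : PySem.Dict String Int) :
    ((fun d : PySem.Dict String Int => d.modify k 0 (· + v))^[n] d).keys
      = if n = 0 then d.keys else PySem.Set.add d.keys k := by
  induction n generalizing d with
  | zero => simp
  | succ n ih =>
    rw [Function.iterate_succ_apply', PySem.Dict.keys_modify, keys_insert_add, ih]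
    cases n with
    | zero => simp
    | succ m =>
      simp only [Nat.succ_ne_zero, if_false]
      exact PySem.Set.add_of_mem (by rw [PySem.Set.mem_add]; right; rfl)

-- a fold whose body only iterates f collapses to one iterate
theorem foldl_iterate (L : List String) (f : PySem.Dict String Int → PySem.Dict String Int)
    (w : String → Nat) (d : PySem.Dict String Int) :
    L.foldl (fun d s => f^[w s] d) d = f^[(L.map w).sum] d := by
  induction L generalizing d with
  | nil => rfl
  | cons s L ih =>
    rw [List.foldl_cons, ih, List.map_cons, List.sum_cons, Nat.add_comm,
      Function.iterate_add_apply]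

-- A's middle loop for one plate
theorem stepA_eq (plates : List (String × Int)) (p : String) (d : PySem.Dict String Int) :
    (PySem.Set.ofList (pySubstrings p)).foldl (fun d s =>
        plates.foldl (fun d rc =>
          if PySem.Str.isIn s rc.1 then d.modify p 0 (· + dictGet plates p) else d) d) d
      = (fun d : PySem.Dict String Int =>
          d.modify p 0 (· + dictGet plates p))^[totalHits plates p] d := by
  have hfun : (fun (d : PySem.Dict String Int) s =>
      plates.foldl (fun d rc =>
        if PySem.Str.isIn s rc.1 then d.modify p 0 (· + dictGet plates p) else d) d)
      = (fun d s => (fun d : PySem.Dict String Int =>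
          d.modify p 0 (· + dictGet plates p))^[hitCount plates s] d) := by
    funext d s
    exact foldl_if_modify plates s p (dictGet plates p) d
  rw [hfun, foldl_iterate]
  rfl

-- per-key value A assigns
def gval (plates : List (String × Int)) (k : String) : Int :=
  (totalHits plates k : Int) * dictGet plates k

theorem A_getD (plates l : List (String × Int)) (d : PySem.Dict String Int) (k : String) :
    (l.foldl (fun d pr =>
        (PySem.Set.ofList (pySubstrings pr.1)).foldl (fun d s =>
          plates.foldl (fun d rc =>
            if PySem.Str.isIn s rc.1 then d.modify pr.1 0 (· + dictGet plates pr.1) else d) d) d)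
        d).getD k 0
      = d.getD k 0 + (l.countP (fun pr => pr.1 == k) : Int) *
          (if 2 ≤ k.toList.length then gval plates k else 0) := by
  induction l generalizing d with
  | nil => simp
  | cons pr l ih =>
    rw [List.foldl_cons, stepA_eq, ih, List.countP_cons]
    by_cases hk : pr.1 = k
    · subst hk
      rw [iterate_bump_getD_self]
      simp only [beq_self_eq_true]
      by_cases h2 : 2 ≤ pr.1.toList.length
      · rw [if_pos h2]
        push_cast
        unfold gval
        ring
      · rw [if_neg h2, totalHits_short plates pr.1 (by omega)]
        push_cast
        ring
    · rw [iterate_bump_getD_ne _ _ _ _ _ (fun h => hk h.symm)]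
      have : (pr.1 == k) = false := by simpa using hk
      rw [this]
      simp

theorem A_keys (plates l : List (String × Int)) (d : PySem.Dict String Int)
    (hsub : ∀ pr ∈ l, pr.1 ∈ plates.map (·.1)) :
    (l.foldl (fun d pr =>
        (PySem.Set.ofList (pySubstrings pr.1)).foldl (fun d s =>
          plates.foldl (fun d rc =>
            if PySem.Str.isIn s rc.1 then d.modify pr.1 0 (· + dictGet plates pr.1) else d) d) d)
        d).keys
      = PySem.Set.update d.keys
          ((l.filter (fun pr => decide (2 ≤ pr.1.toList.length))).map (·.1)) := by
  induction l generalizing d with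
  | nil => simp [PySem.Set.update]
  | cons pr l ih =>
    rw [List.foldl_cons, stepA_eq, List.filter_cons]
    by_cases h2 : 2 ≤ pr.1.toList.length
    · have hpos : totalHits plates pr.1 ≠ 0 := by
        have := totalHits_pos plates pr.1 h2 (hsub pr (List.mem_cons_self))
        omega
      rw [ih _ (fun q hq => hsub q (List.mem_cons_of_mem _ hq))]
      rw [iterate_bump_keys, if_neg hpos]
      simp only [h2, decide_true, if_true, List.map_cons]
      rw [PySem.Set.update_cons]
    · rw [totalHits_short plates pr.1 (by omega)]
      simp only [Function.iterate_zero, id_eq]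
      rw [ih _ (fun q hq => hsub q (List.mem_cons_of_mem _ hq))]
      rw [decide_eq_false h2]
      simp only [Bool.false_eq_true, if_false]

-- B's first loop: the inverted index counts, per substring, the readings that produce it
theorem B1_getD (l : List (String × Int)) (d : PySem.Dict String Int) (s : String) :
    (l.foldl (fun d pr =>
        (PySem.Set.ofList (pySubstrings pr.1)).foldl
          (fun d s => d.insert s (d.getD s 0 + 1)) d) d).getD s 0
      = d.getD s 0 + (l.countP (fun pr => decide (s ∈ pySubstrings pr.1)) : Int) := by
  induction l generalizing d with
  | nil => simp
  | cons pr l ih =>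
    rw [List.foldl_cons, ih, PySem.Dict.getD_foldl_insert_add_one, List.countP_cons]
    by_cases hm : s ∈ pySubstrings pr.1
    · have hm' : s ∈ PySem.Set.ofList (pySubstrings pr.1) := (PySem.Set.mem_ofList _ _).mpr hm
      rw [List.count_eq_one_of_mem (PySem.Set.nodup_ofList _) hm']
      simp [hm]
      ring
    · have hm' : s ∉ PySem.Set.ofList (pySubstrings pr.1) := fun h =>
        hm ((PySem.Set.mem_ofList _ _).mp h)
      rw [List.count_eq_zero_of_not_mem hm']
      simp [hm]

-- B's second loop, keys
theorem B2_keys (plates l : List (String × Int)) (C d : PySem.Dict String Int) :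
    (l.foldl (fun d pr =>
        if 2 ≤ PySem.Str.len pr.1 then
          d.insert pr.1 (dictGet plates pr.1 *
            ((PySem.Set.ofList (pySubstrings pr.1)).map (fun s => C.getD s 0)).sum)
        else d) d).keys
      = PySem.Set.update d.keys
          ((l.filter (fun pr => decide (2 ≤ pr.1.toList.length))).map (·.1)) := by
  induction l generalizing d with
  | nil => simp [PySem.Set.update]
  | cons pr l ih =>
    rw [List.foldl_cons, List.filter_cons]
    have hiff : (2 ≤ PySem.Str.len pr.1) ↔ (2 ≤ pr.1.toList.length) := by
      rw [PySem.Str.len_eq]; omega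
    by_cases h2 : 2 ≤ pr.1.toList.length
    · rw [if_pos (hiff.mpr h2), ih, keys_insert_add]
      simp only [h2, decide_true, if_true, List.map_cons]
      rw [PySem.Set.update_cons]
    · rw [if_neg (fun h => h2 (hiff.mp h)), ih, decide_eq_false h2]
      simp only [Bool.false_eq_true, if_false]

-- B's second loop, values
theorem B2_getD (plates l : List (String × Int)) (C d : PySem.Dict String Int) (k : String) :
    (l.foldl (fun d pr =>
        if 2 ≤ PySem.Str.len pr.1 then
          d.insert pr.1 (dictGet plates pr.1 *
            ((PySem.Set.ofList (pySubstrings pr.1)).map (fun s => C.getD s 0)).sum)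
        else d) d).getD k 0
      = if 2 ≤ k.toList.length ∧ k ∈ l.map (·.1) then
          dictGet plates k *
            ((PySem.Set.ofList (pySubstrings k)).map (fun s => C.getD s 0)).sum
        else d.getD k 0 := by
  induction l generalizing d with
  | nil => simp
  | cons pr l ih =>
    rw [List.foldl_cons, ih]
    have hiff : (2 ≤ PySem.Str.len pr.1) ↔ (2 ≤ pr.1.toList.length) := by
      rw [PySem.Str.len_eq]; omega
    by_cases hrest : 2 ≤ k.toList.length ∧ k ∈ l.map (·.1)
    · rw [if_pos hrest, if_pos ⟨hrest.1, List.mem_cons_of_mem _ hrest.2⟩]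
    · rw [if_neg hrest]
      by_cases hk : pr.1 = k
      · subst hk
        by_cases h2 : 2 ≤ pr.1.toList.length
        · rw [if_pos (hiff.mpr h2), PySem.Dict.getD_insert_self,
            if_pos (⟨h2, by simp⟩ : 2 ≤ pr.1.toList.length ∧ pr.1 ∈ (pr :: l).map (·.1))]
        · rw [if_neg (fun h => h2 (hiff.mp h)),
            if_neg (fun h => h2 h.1)]
      · have hcond : ¬ (2 ≤ k.toList.length ∧ k ∈ (pr :: l).map (·.1)) := by
          rintro ⟨ha, hb⟩
          rcases List.mem_map.mp hb with ⟨q, hq, hfq⟩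
          rcases List.mem_cons.mp hq with h | h
          · exact hk (by rw [h] at hfq; exact hfq)
          · exact hrest ⟨ha, List.mem_map.mpr ⟨q, h, hfq⟩⟩
        rw [if_neg hcond]
        by_cases h2 : 2 ≤ PySem.Str.len pr.1
        · rw [if_pos h2, PySem.Dict.getD_insert_of_ne _ _ _ (Ne.symm hk)]
        · rw [if_neg h2]

theorem final_congr (K : List String) (f g : String → Int) (h : ∀ k, f k = g k) :
    PySem.List.slice (PySem.List.sorted K f true) none (some 2)
      = PySem.List.slice (PySem.List.sorted K g true) none (some 2) := by
  rw [funext h]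

-- A's per-plate score equals B's per-plate score
theorem gval_eq_wval (plates : List (String × Int)) (k : String) :
    gval plates k = dictGet plates k *
      ((PySem.Set.ofList (pySubstrings k)).map (fun s =>
        (plates.foldl (fun d pr =>
          (PySem.Set.ofList (pySubstrings pr.1)).foldl
            (fun d s => d.insert s (d.getD s 0 + 1)) d) PySem.Dict.empty).getD s 0)).sum := by
  have hmap : (PySem.Set.ofList (pySubstrings k)).map (fun s =>
      (plates.foldl (fun d pr =>
        (PySem.Set.ofList (pySubstrings pr.1)).foldl
          (fun d s => d.insert s (d.getD s 0 + 1)) d) PySem.Dict.empty).getD s 0)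
      = (PySem.Set.ofList (pySubstrings k)).map (fun s => (hitCount plates s : Int)) := by
    apply List.map_congr_left
    intro s hs
    have h2s : 2 ≤ s.toList.length :=
      ((mem_pySubstrings _ _).mp ((PySem.Set.mem_ofList _ _).mp hs)).1
    rw [B1_getD, PySem.Dict.getD_empty, zero_add]
    have hpred : (fun pr : String × Int => decide (s ∈ pySubstrings pr.1))
        = (fun pr : String × Int => PySem.Str.isIn s pr.1) := by
      funext pr
      by_cases hinf : s.toList <:+: pr.1.toList
      · rw [(PySem.Str.isIn_iff_infix _ _).mpr hinf,
          decide_eq_true ((mem_pySubstrings _ _).mpr ⟨h2s, hinf⟩)]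
      · cases hb : PySem.Str.isIn s pr.1
        · exact decide_eq_false (fun hmem => hinf (((mem_pySubstrings _ _).mp hmem).2))
        · exact absurd ((PySem.Str.isIn_iff_infix _ _).mp hb) hinf
    rw [hpred]
    rfl
  rw [hmap]
  have hcast : ((PySem.Set.ofList (pySubstrings k)).map (fun s => (hitCount plates s : Int))).sum
      = (totalHits plates k : Int) := by
    rw [totalHits, Nat.cast_list_sum, List.map_map]
    rfl
  rw [hcast, gval, mul_comm]

-- ===== VERDICT (by name: the statement is the Claim_ definition above) =====
theorem definePossibleReadings_spec : Claim_equal_definePossibleReadings := by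
  intro plates _hdom hpre
  unfold Pre_definePossibleReadings at hpre
  unfold Spec_definePossibleReadings
  simp only [definePossibleReadings, definePossibleReadings_alt]
  -- keys of both final dicts are the len >= 2 plates, in order
  have hnodK : ((plates.filter (fun pr => decide (2 ≤ pr.1.toList.length))).map (·.1)).Nodup :=
    hpre.sublist (List.Sublist.map (·.1) (List.filter_sublist (l := plates)))
  have hKA := A_keys plates plates PySem.Dict.empty
    (fun pr h => List.mem_map.mpr ⟨pr, h, rfl⟩)
  have hKB := B2_keys plates plates (plates.foldl (fun d pr =>
      (PySem.Set.ofList (pySubstrings pr.1)).foldl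
        (fun d s => d.insert s (d.getD s 0 + 1)) d) PySem.Dict.empty) PySem.Dict.empty
  rw [PySem.Dict.keys_empty, PySem.Set.update_nil_left,
    PySem.Set.ofList_eq_self_of_nodup _ hnodK] at hKA hKB
  rw [hKA, hKB]
  -- the two key functions agree
  have hcnt1 : ∀ k, k ∈ plates.map (·.1) → plates.countP (fun pr => pr.1 == k) = 1 := by
    intro k hm
    have h1 : plates.countP (fun pr => pr.1 == k) = (plates.map (·.1)).count k := by
      rw [List.count, List.countP_map]; rfl
    rw [h1]
    exact List.count_eq_one_of_mem hpre hm
  have hcnt0 : ∀ k, k ∉ plates.map (·.1) → plates.countP (fun pr => pr.1 == k) = 0 := by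
    intro k hm
    rw [List.countP_eq_zero]
    intro pr hpr hbeq
    exact hm (List.mem_map.mpr ⟨pr, hpr, by simpa using hbeq⟩)
  refine final_congr _ _ _ (fun k => ?_)
  rw [A_getD plates plates PySem.Dict.empty k, B2_getD plates plates _ PySem.Dict.empty k,
    PySem.Dict.getD_empty, zero_add]
  by_cases hm : k ∈ plates.map (·.1)
  · rw [hcnt1 k hm]
    by_cases h2 : 2 ≤ k.toList.length
    · rw [if_pos h2, if_pos ⟨h2, hm⟩, gval_eq_wval plates k]
      push_cast
      ring
    · rw [if_neg h2, if_neg (fun h => h2 h.1)]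
      ring
  · rw [hcnt0 k hm, if_neg (fun h : 2 ≤ k.toList.length ∧ k ∈ plates.map (·.1) => hm h.2)]
    push_cast
    ring
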